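-- pv_equiv track=rewrite | github.com/shizaaejaz/Automated-Chess-Training-with-Computer-Vision-Driven-Robotic-Arm-FYDP- | chess_brain.py | _expand_row
-- ===== SOURCE A (Python) =====
-- def _expand_row(row: str) -> list:
--     """
--     Expand a FEN row string into a list of 1 character per square.
--     Empty squares become "."
--
--     Example:
--         "3P2"  → ['.', '.', '.', 'P', '.', '.']
--         "PPPP1PP" → ['P','P','P','P','.','P','P']
--     """
--     result = []
--     for ch in row:
--         if ch.isdigit():
--             result.extend(["."] * int(ch))
--         else:
--             result.append(ch)
--     return result
-- ===== SOURCE B (Python) =====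
-- import re
--
-- def _expand_row(row: str) -> list:
--     return list(re.sub(r"\d", lambda m: "." * int(m.group()), row))
-- ===== Notes on version B (the rewrite author's own statement) =====
-- stated objective: idiomatic
-- what changed: Replaced the explicit scan-and-branch loop with list accumulator by a regex substitution (re.sub with a replacement callback turning each digit into a run of dots) followed by list() of the resulting string.
import Mathlib
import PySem

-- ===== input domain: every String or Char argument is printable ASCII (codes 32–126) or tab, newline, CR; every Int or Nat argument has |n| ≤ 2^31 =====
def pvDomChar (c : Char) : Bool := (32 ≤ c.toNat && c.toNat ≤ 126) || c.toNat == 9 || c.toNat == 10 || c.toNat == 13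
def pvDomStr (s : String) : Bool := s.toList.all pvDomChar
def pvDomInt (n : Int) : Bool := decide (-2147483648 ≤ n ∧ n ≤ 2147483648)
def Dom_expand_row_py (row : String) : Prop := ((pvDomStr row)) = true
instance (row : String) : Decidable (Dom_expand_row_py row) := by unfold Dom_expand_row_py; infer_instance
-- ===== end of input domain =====

-- B replaces A's explicit scan-and-branch accumulator loop by a digit→dots substitution over the
-- string followed by listing its characters (idiomatic; same cost).

-- ===== PORT A =====
-- int(ch) for a digit character ch: exact on ASCII digits (the only digits in Dom_)
def pvDigitVal (ch : Char) : Nat := ch.toNat - 48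

def expand_row_py (row : String) : List String :=
  row.toList.foldl
    (fun result ch =>
      if PySem.Chars.isdigit ch then
        result ++ List.replicate (pvDigitVal ch) "."
      else
        result ++ [String.mk [ch]])
    []

-- ===== PORT B =====
-- re.sub(r'\d', lambda m: '.' * int(m.group()), row): each digit char becomes a run of dots
-- (\d on the ASCII domain = '0'..'9'), non-digits pass through; then list(...) of the string.
def pvSubDigits (cs : List Char) : List Char :=
  cs.flatMap (fun c =>
    if PySem.Chars.isdigit c then List.replicate (pvDigitVal c) '.' else [c])

def expand_row_py_alt (row : String) : List String :=
  (pvSubDigits row.toList).map (fun c => String.mk [c])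

-- ===== PRECONDITION & SPEC =====
def Spec_expand_row_py (row : String) (out : List String) : Prop := out = expand_row_py_alt row
instance (row : String) (out : List String) : Decidable (Spec_expand_row_py row out) := by unfold Spec_expand_row_py; infer_instance

-- ===== CLAIM (what is proved, stated in full; the proofs are below) =====
def Claim_equal_expand_row_py : Prop := ∀ (row : String), Dom_expand_row_py row → Spec_expand_row_py row (expand_row_py row)

-- ===== LEMMAS AND PROOFS =====
theorem expand_row_foldl_eq (cs : List Char) (acc : List String) :
    cs.foldl
      (fun result ch =>
        if PySem.Chars.isdigit ch then
          result ++ List.replicate (pvDigitVal ch) "."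
        else
          result ++ [String.mk [ch]])
      acc
    = acc ++ (pvSubDigits cs).map (fun c => String.mk [c]) := by
  induction cs generalizing acc with
  | nil => simp [pvSubDigits]
  | cons c cs ih =>
    simp only [List.foldl_cons, pvSubDigits, List.flatMap_cons, List.map_append, ih]
    by_cases h : PySem.Chars.isdigit c
    · simp [h, List.map_replicate, List.append_assoc, show String.mk ['.'] = "." from rfl]
    · simp [h, List.append_assoc]

-- ===== VERDICT (by name: the statement is the Claim_ definition above) =====
theorem expand_row_py_spec : Claim_equal_expand_row_py := by
  intro row _
  unfold Spec_expand_row_py expand_row_py expand_row_py_alt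
  exact expand_row_foldl_eq row.toList []
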